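-- pv_equiv track=rewrite | github.com/BParvaz/Constraint-Satisfier | constraintsLab.py | BrokenDiags
-- ===== SOURCE A (Python) =====
-- def BrokenDiags(n):
--   """Solves Task 3 of the lab manual
--
--   :param n: size of square
--   :type n:  int
--
--   :return: list of broken diagonals
--   :rtype:  list[list[int]]
--   """
--
--   #So, thinking out loud
--   #our return array is of size (n), and is comprised of an array of ints
--   #There are 2n broken diagonals for any given size n magic square
--   #We would compute them by considering going in the forward direction (x++, y--)
--   #And then the backwards direction (x--, y--)
--   bd = []
--   for i in range(n):
--     x = i
--     y = 0
--     currbd = []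
--     for j in range(n):
--       currbd.append((n*y)+x%n)
--       x += 1
--       y += 1
--     bd.append(currbd)
--
--   for i in range(n):
--     x = i
--     y = 0
--     currbd = []
--     for j in range(n):
--       currbd.append((n*y)+x%n)
--       x -= 1
--       y += 1
--     bd.append(currbd)
--
--   return bd
-- ===== SOURCE B (Python) =====
-- def BrokenDiags(n):
--   grid = [[n * r + c for c in range(n)] for r in range(n)]
--   rotf = [row[j:] + row[:j] for j, row in enumerate(grid)]
--   rotb = [row[-j:] + row[:-j] if j else row[:] for j, row in enumerate(grid)]
--   bd = [[r[i] for r in rotf] for i in range(n)]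
--   bd += [[r[i] for r in rotb] for i in range(n)]
--   return bd
-- ===== Notes on version B (the rewrite author's own statement) =====
-- stated objective: alternative
-- what changed: B materializes the n-by-n magic-square index grid, builds the forward/backward rotation of each row with slicing, and reads the 2n broken diagonals off these rotated rows column by column, instead of A's explicit loops with mutable x/y counters and an inline per-cell formula.
import Mathlib
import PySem

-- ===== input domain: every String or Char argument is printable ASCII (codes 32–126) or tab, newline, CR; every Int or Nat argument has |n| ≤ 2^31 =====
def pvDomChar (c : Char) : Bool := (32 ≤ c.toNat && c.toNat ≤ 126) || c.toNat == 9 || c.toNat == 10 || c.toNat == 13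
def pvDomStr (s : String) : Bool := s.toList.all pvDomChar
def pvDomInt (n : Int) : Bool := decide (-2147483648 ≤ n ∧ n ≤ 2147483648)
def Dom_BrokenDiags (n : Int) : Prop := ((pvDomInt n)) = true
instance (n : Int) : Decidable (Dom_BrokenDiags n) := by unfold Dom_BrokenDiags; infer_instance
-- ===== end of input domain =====

-- B materializes the n×n magic-square index grid, rotates each row, and reads the 2n broken
-- diagonals off the rotations column by column, instead of A's loops with mutable x/y counters
-- (objective: alternative decomposition via a stored table).

-- ===== PORT A =====
def BrokenDiags (n : Int) : List (List Int) :=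
  let bd1 := (PySem.List.pyRange 0 n 1).foldl (fun bd i =>
    let st := (PySem.List.pyRange 0 n 1).foldl
      (fun (st : Int × Int × List Int) _ =>
        (st.1 + 1, st.2.1 + 1, st.2.2 ++ [n * st.2.1 + PySem.Int.mod st.1 n]))
      (i, 0, [])
    bd ++ [st.2.2]) []
  (PySem.List.pyRange 0 n 1).foldl (fun bd i =>
    let st := (PySem.List.pyRange 0 n 1).foldl
      (fun (st : Int × Int × List Int) _ =>
        (st.1 + -1, st.2.1 + 1, st.2.2 ++ [n * st.2.1 + PySem.Int.mod st.1 n]))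
      (i, 0, [])
    bd ++ [st.2.2]) bd1

-- ===== PORT B =====
def BrokenDiags_alt (n : Int) : List (List Int) :=
  let grid := (PySem.List.pyRange 0 n 1).map (fun r =>
    (PySem.List.pyRange 0 n 1).map (fun c => n * r + c))
  let rotf := (PySem.List.enumerate grid 0).map (fun jr =>
    PySem.List.slice jr.2 (some jr.1) none ++ PySem.List.slice jr.2 none (some jr.1))
  let rotb := (PySem.List.enumerate grid 0).map (fun jr =>
    if jr.1 ≠ 0 then
      PySem.List.slice jr.2 (some (-jr.1)) none ++ PySem.List.slice jr.2 none (some (-jr.1))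
    else PySem.List.slice jr.2 none none)
  let bd := (PySem.List.pyRange 0 n 1).map (fun i => rotf.map (fun r => PySem.List.pyGetD r i 0))
  bd ++ (PySem.List.pyRange 0 n 1).map (fun i => rotb.map (fun r => PySem.List.pyGetD r i 0))

-- ===== PRECONDITION & SPEC =====
def Spec_BrokenDiags (n : Int) (out : List (List Int)) : Prop := out = BrokenDiags_alt n
instance (n : Int) (out : List (List Int)) : Decidable (Spec_BrokenDiags n out) := by unfold Spec_BrokenDiags; infer_instance

-- ===== CLAIM (what is proved, stated in full; the proofs are below) =====
def Claim_equal_BrokenDiags : Prop := ∀ (n : Int), Dom_BrokenDiags n → Spec_BrokenDiags n (BrokenDiags n)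

-- ===== LEMMAS AND PROOFS =====

-- A's inner counter loop, generalised over the x-step s (s = 1 forward, s = -1 backward).
theorem pvInnerA (n s : Int) : ∀ (l : List Int) (x y : Int) (c : List Int),
    l.foldl (fun (st : Int × Int × List Int) _ =>
        (st.1 + s, st.2.1 + 1, st.2.2 ++ [n * st.2.1 + PySem.Int.mod st.1 n])) (x, y, c)
      = (x + s * l.length, y + l.length,
         c ++ (List.range l.length).map
           (fun j : Nat => n * (y + (j : Int)) + PySem.Int.mod (x + s * (j : Int)) n)) := by
  intro l
  induction l with
  | nil => intro x y c; simp
  | cons a t ih =>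
    intro x y c
    simp only [List.foldl_cons, ih (x + s) (y + 1) (c ++ [n * y + PySem.Int.mod x n]),
      List.length_cons, List.range_succ_eq_map, Prod.mk.injEq]
    refine ⟨by push_cast; ring, by push_cast; ring, ?_⟩
    have htail : List.map ((fun j : Nat => n * (y + (j : Int)) + PySem.Int.mod (x + s * (j : Int)) n) ∘ Nat.succ) (List.range t.length)
        = List.map (fun j : Nat => n * (y + 1 + (j : Int)) + PySem.Int.mod (x + s + s * (j : Int)) n) (List.range t.length) := by
      apply List.map_congr_left
      intro j _
      simp only [Function.comp, Nat.succ_eq_add_one]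
      have h1 : x + s * (((j + 1 : Nat) : Int)) = x + s + s * (j : Int) := by push_cast; ring
      rw [h1]
      push_cast
      ring
    simp only [List.map_cons, List.map_map, htail, Nat.cast_zero, mul_zero, add_zero,
      List.append_assoc, List.cons_append, List.nil_append]

-- reading column i of a rotation (drop m ++ take m) of a pyRange-built grid row
theorem pvRotGet (n j : Int) (hn : 0 < n) (m : Nat) (hm : m ≤ n.toNat) (i : Int)
    (hi0 : 0 ≤ i) (hin : i < n) :
    PySem.List.pyGetD
      ((((PySem.List.pyRange 0 n 1).map (fun c => n * j + c)).drop m) ++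
        ((PySem.List.pyRange 0 n 1).map (fun c => n * j + c)).take m) i 0
    = n * j + ((((i.toNat + m) % n.toNat : Nat)) : Int) := by
  have hlen : (((PySem.List.pyRange 0 n 1).map (fun c => n * j + c)) : List Int).length = n.toNat := by
    simp [PySem.List.length_pyRange_one]
  rw [← List.rotate_eq_drop_append_take (by omega)]
  rw [PySem.List.pyGetD_eq_getElem _ 0 hi0 (by simp only [List.length_rotate, hlen]; omega)]
  rw [List.getElem_rotate]
  simp only [PySem.List.pyRange_one, sub_zero, List.map_map, List.getElem_map,
    List.getElem_range, Function.comp, List.length_map, List.length_range]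
  ring_nf

-- casting a Python modulus of a nonnegative sum to a Nat modulus
theorem pvModCast (n : Int) (hn : 0 < n) (a : Int) (ha : 0 ≤ a) :
    PySem.Int.mod a n = (((a.toNat % n.toNat : Nat)) : Int) := by
  rw [PySem.Int.mod_eq_emod_of_pos hn]
  have h1 : a = ((a.toNat : Nat) : Int) := by omega
  have h2 : n = ((n.toNat : Nat) : Int) := by omega
  rw [h1, h2]
  push_cast
  rfl

-- pyGetD on an unrotated row, as the m = 0 rotation
theorem pvRotGet0 (n j : Int) (hn : 0 < n) (i : Int) (hi0 : 0 ≤ i) (hin : i < n) :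
    PySem.List.pyGetD ((PySem.List.pyRange 0 n 1).map (fun c => n * j + c)) i 0
    = n * j + ((((i.toNat + 0) % n.toNat : Nat)) : Int) := by
  have := pvRotGet n j hn 0 (by omega) i hi0 hin
  simpa using this

theorem pvMain (n : Int) : BrokenDiags n = BrokenDiags_alt n := by
  rcases le_or_gt n 0 with h | h
  · simp [BrokenDiags, BrokenDiags_alt, PySem.List.pyRange_one_eq_nil h]
  · have hcast : ((n.toNat : Nat) : Int) = n := Int.toNat_of_nonneg h.le
    have hlen : (PySem.List.pyRange 0 n 1).length = n.toNat := by
      simp [PySem.List.length_pyRange_one]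
    have hglen : (PySem.List.len ((PySem.List.pyRange 0 n 1).map (fun r =>
        (PySem.List.pyRange 0 n 1).map (fun c => n * r + c))) : Int) = n := by
      simp [PySem.List.len_eq, hlen, hcast]
    have hrl : ∀ (v : Int), (((PySem.List.pyRange 0 n 1).map (fun c => n * v + c)) : List Int).length = n.toNat := by
      intro v; simp [PySem.List.length_pyRange_one]
    simp only [BrokenDiags, BrokenDiags_alt,
      PySem.List.foldl_append_singleton_eq_map, List.nil_append]
    rw [PySem.List.enumerate_eq_map_pyRange _ ([] : List Int), hglen]
    congr 1
    · -- forward diagonals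
      apply List.map_congr_left
      intro i hi
      have hi' := (PySem.List.mem_pyRange_one).1 hi
      rw [pvInnerA n 1 (PySem.List.pyRange 0 n 1) i 0 []]
      simp only [List.nil_append, hlen]
      apply List.ext_getElem
      · simp [hlen]
      intro k hk1 hk2
      have hkN : k < n.toNat := by simpa using hk1
      have hkn : ((k : Nat) : Int) < n := by omega
      simp only [List.getElem_map, List.getElem_range, PySem.List.getElem_pyRange_one, zero_add]
      rw [PySem.List.pyGetD_map_pyRange_of_nonneg _ _ _ _ (by positivity) hkn]
      rw [PySem.List.slice_from _ (by positivity), PySem.List.slice_to _ (by positivity)]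
      simp only [Int.toNat_natCast]
      rw [pvRotGet n ((k : Nat) : Int) h k (by omega) i hi'.1 hi'.2]
      rw [pvModCast n h (i + 1 * (k : Int)) (by omega)]
      have harg : (i + 1 * (k : Int)).toNat = i.toNat + k := by omega
      rw [harg]
    · -- backward diagonals
      apply List.map_congr_left
      intro i hi
      have hi' := (PySem.List.mem_pyRange_one).1 hi
      rw [pvInnerA n (-1) (PySem.List.pyRange 0 n 1) i 0 []]
      simp only [List.nil_append, hlen]
      apply List.ext_getElem
      · simp [hlen]
      intro k hk1 hk2
      have hkN : k < n.toNat := by simpa using hk1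
      have hkn : ((k : Nat) : Int) < n := by omega
      simp only [List.getElem_map, List.getElem_range, PySem.List.getElem_pyRange_one, zero_add]
      rw [PySem.List.pyGetD_map_pyRange_of_nonneg _ _ _ _ (by positivity) hkn]
      by_cases hk0 : k = 0
      · subst hk0
        simp only [Nat.cast_zero, ne_eq, not_true_eq_false, if_false, mul_zero,
          PySem.List.slice_none_none]
        have h0 := pvRotGet0 n 0 h i hi'.1 hi'.2
        simp only [mul_zero] at h0
        rw [h0, pvModCast n h (i + 0) (by omega)]
        have harg : (i + 0).toNat = i.toNat + 0 := by omega
        rw [harg]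
      · have hkpos : (0 : Int) < ((k : Nat) : Int) := by omega
        rw [if_pos (by omega : ((k : Nat) : Int) ≠ 0)]
        rw [PySem.List.slice_from_neg_natCast _ _ (by omega),
          PySem.List.slice_to_neg_natCast _ _ (by omega)]
        rw [hrl]
        rw [pvRotGet n ((k : Nat) : Int) h (n.toNat - k) (by omega) i hi'.1 hi'.2]
        have hshift : PySem.Int.mod (i + -1 * (k : Int)) n
            = PySem.Int.mod (i + -1 * (k : Int) + n) n := by
          rw [PySem.Int.mod_eq_emod_of_pos h, PySem.Int.mod_eq_emod_of_pos h,
            Int.add_emod_right]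
        rw [hshift, pvModCast n h (i + -1 * (k : Int) + n) (by omega)]
        have harg : (i + -1 * (k : Int) + n).toNat = i.toNat + (n.toNat - k) := by omega
        rw [harg]

-- ===== VERDICT (by name: the statement is the Claim_ definition above) =====
theorem BrokenDiags_spec : Claim_equal_BrokenDiags := by
  intro n _
  exact pvMain n
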